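-- pv_equiv track=rewrite | github.com/kryshworld/Python-Code-for-Bachelor-Thesis-The-Optimal-Bundle-Release-Strategy-For-Algorithmic-RS | Main_Runner_1.py | extract_listeners_over_time
-- ===== SOURCE A (Python) =====
-- def extract_listeners_over_time(recommendations_history, albums, I):
--     """Extract cumulative unique listeners over time periods"""
--     listeners_over_time = {album_id: [] for album_id in albums.keys()}
--     # Track which users have listened to each album
--     users_listened_to_album = {album_id: set() for album_id in albums.keys()}
--
--     for period, recommendations in enumerate(recommendations_history):
--         # Track new listeners in this period for each album
--         for user_id, rec_song, actual_song, followed in recommendations: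
--             # Check which album the actual song belongs to
--             for album_id, song_list in albums.items():
--                 if actual_song in song_list:
--                     users_listened_to_album[album_id].add(user_id)
--                     break
--
--         # Update cumulative unique listeners count
--         for album_id in albums.keys():
--             listeners_over_time[album_id].append(len(users_listened_to_album[album_id]))
--
--     return listeners_over_time
-- ===== SOURCE B (Python) =====
-- def extract_listeners_over_time(recommendations_history, albums, I):
--     """Extract cumulative unique listeners over time periods.
--
--     Two-phase rewrite: a song->album index built once replaces the per-event
--     scan over albums; a first-seen table plus prefix sums replaces the
--     per-period set-size recomputation.
--     """
--     items = list(albums.items())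
--     P = len(recommendations_history)
--     # Phase 0: map each song to the index of the first album containing it
--     song_to_idx = {}
--     for idx, (_album_id, song_list) in enumerate(items):
--         for song in song_list:
--             song_to_idx.setdefault(song, idx)
--     # Phase 1: first_seen[idx][user] = first period in which user listened to album idx
--     first_seen = [dict() for _ in items]
--     for period, recommendations in enumerate(recommendations_history):
--         for user_id, _rec_song, actual_song, _followed in recommendations:
--             idx = song_to_idx.get(actual_song)
--             if idx is not None:
--                 first_seen[idx].setdefault(user_id, period)
--     # Phase 2: per-period new-listener counts, then running prefix sums
--     result = {}
--     for (album_id, _song_list), fs in zip(items, first_seen):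
--         new = [0] * P
--         for p in fs.values():
--             new[p] += 1
--         running, cum = 0, []
--         for c in new:
--             running += c
--             cum.append(running)
--         result[album_id] = cum
--     return result
-- ===== Notes on version B (the rewrite author's own statement) =====
-- stated objective: faster
-- what changed: Replaces A's per-recommendation linear scan over albums with a song-to-album index dict built once, and A's per-period maintenance of listener sets with appended set sizes by a two-phase first-seen table (earliest period per album/user) whose per-period new-listener counts are prefix-summed into the cumulative totals.
import Mathlib
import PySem

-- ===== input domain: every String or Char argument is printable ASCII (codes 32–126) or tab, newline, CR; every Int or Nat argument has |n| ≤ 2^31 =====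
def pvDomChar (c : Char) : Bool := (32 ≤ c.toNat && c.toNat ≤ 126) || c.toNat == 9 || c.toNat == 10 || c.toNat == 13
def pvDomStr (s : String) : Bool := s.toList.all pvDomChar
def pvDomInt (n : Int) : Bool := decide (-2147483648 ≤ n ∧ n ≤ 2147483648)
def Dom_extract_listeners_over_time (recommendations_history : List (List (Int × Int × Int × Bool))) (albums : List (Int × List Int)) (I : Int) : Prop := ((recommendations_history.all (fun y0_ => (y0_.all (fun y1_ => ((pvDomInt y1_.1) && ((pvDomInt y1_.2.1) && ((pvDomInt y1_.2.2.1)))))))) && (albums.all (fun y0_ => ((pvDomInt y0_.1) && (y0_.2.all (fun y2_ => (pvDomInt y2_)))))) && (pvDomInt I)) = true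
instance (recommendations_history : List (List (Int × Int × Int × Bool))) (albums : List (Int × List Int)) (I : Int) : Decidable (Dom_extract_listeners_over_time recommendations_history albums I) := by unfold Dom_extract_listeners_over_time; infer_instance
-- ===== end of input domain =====

-- B rewrites A's per-event scan over albums into a song→album index built once, and the
-- per-period set-size recomputation into a first-seen table with prefix sums (objective: faster).
-- The two dicts keyed by albums' keys are represented positionally, in albums' insertion order
-- (exact: a Python dict's keys are distinct).

-- ===== PORT A =====
-- first album (by position in albums' insertion order) whose song list contains `song`
-- (A's inner `for album_id, song_list in albums.items(): if actual_song in song_list: …; break`)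
def pvLocate (albums : List (Int × List Int)) (song : Int) : Option Nat :=
  albums.findIdx? (fun a => a.2.contains song)

-- one recommendation: add the user to the hit album's listener set
def pvStepRec (albums : List (Int × List Int)) (sets : List (PySem.Set Int))
    (r : Int × Int × Int × Bool) : List (PySem.Set Int) :=
  match pvLocate albums r.2.2.1 with
  | some i => sets.modify i (fun s => PySem.Set.add s r.1)
  | none => sets

-- one period: absorb its recommendations, then append each album's current set size
def pvStepPeriod (albums : List (Int × List Int))
    (st : List (PySem.Set Int) × List (Int × List Int))
    (recs : List (Int × Int × Int × Bool)) :
    List (PySem.Set Int) × List (Int × List Int) :=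
  let sets := recs.foldl (pvStepRec albums) st.1
  (sets, List.zipWith (fun (row : Int × List Int) (s : PySem.Set Int) =>
    (row.1, row.2 ++ [PySem.Set.len s])) st.2 sets)

def extract_listeners_over_time (recommendations_history : List (List (Int × Int × Int × Bool))) (albums : List (Int × List Int)) (I : Int) : List (Int × List Int) :=
  (recommendations_history.foldl (pvStepPeriod albums)
    (albums.map (fun _ => PySem.Set.empty), albums.map (fun a => (a.1, [])))).2

-- ===== PORT B =====
-- Phase 0: song → index of the first album containing it
def pvSongIndex (albums : List (Int × List Int)) : PySem.Dict Int Int :=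
  (PySem.List.enumerate albums).foldl
    (fun d p => p.2.2.foldl (fun d song => d.setdefault song p.1) d)
    PySem.Dict.empty

-- Phase 1: first_seen[idx][user] = first period in which the user listened to album idx
def pvFirstSeen (recommendations_history : List (List (Int × Int × Int × Bool)))
    (albums : List (Int × List Int)) : List (PySem.Dict Int Int) :=
  (PySem.List.enumerate recommendations_history).foldl
    (fun fs pr =>
      pr.2.foldl (fun fs r =>
        match (pvSongIndex albums).get? r.2.2.1 with
        | some idx => fs.modify idx.toNat (fun d => d.setdefault r.1 pr.1)
          -- idx.toNat is exact: the stored idx is an enumerate index, hence ≥ 0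
        | none => fs) fs)
    (albums.map (fun _ => PySem.Dict.empty))

-- Phase 2: per-period new-listener counts …
def pvNewCounts (P : Nat) (fs : PySem.Dict Int Int) : List Int :=
  fs.values.foldl (fun tbl p => tbl.modify p.toNat (· + 1)) (List.replicate P 0)
  -- p.toNat is exact: stored periods are enumerate indices, hence ≥ 0

-- … then running prefix sums
def pvPrefixSums (row : List Int) : List Int :=
  (row.foldl (fun (st : Int × List Int) c => (st.1 + c, st.2 ++ [st.1 + c])) (0, [])).2

def extract_listeners_over_time_alt (recommendations_history : List (List (Int × Int × Int × Bool))) (albums : List (Int × List Int)) (I : Int) : List (Int × List Int) :=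
  (albums.zip (pvFirstSeen recommendations_history albums)).foldl
    (fun out p => out ++ [(p.1.1, pvPrefixSums (pvNewCounts recommendations_history.length p.2))]) []

-- ===== PRECONDITION & SPEC =====
def Spec_extract_listeners_over_time (recommendations_history : List (List (Int × Int × Int × Bool))) (albums : List (Int × List Int)) (I : Int) (out : List (Int × List Int)) : Prop := out = extract_listeners_over_time_alt recommendations_history albums I
instance (recommendations_history : List (List (Int × Int × Int × Bool))) (albums : List (Int × List Int)) (I : Int) (out : List (Int × List Int)) : Decidable (Spec_extract_listeners_over_time recommendations_history albums I out) := by unfold Spec_extract_listeners_over_time; infer_instance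

-- ===== CLAIM (what is proved, stated in full; the proofs are below) =====
def Claim_equal_extract_listeners_over_time : Prop := ∀ (recommendations_history : List (List (Int × Int × Int × Bool))) (albums : List (Int × List Int)) (I : Int), Dom_extract_listeners_over_time recommendations_history albums I → Spec_extract_listeners_over_time recommendations_history albums I (extract_listeners_over_time recommendations_history albums I)

-- ===== LEMMAS AND PROOFS =====

theorem pv_length_foldl_omodify {σ β : Type} (tgt : β → Option Nat) (f : β → σ → σ) :
    ∀ (l : List β) (st : List σ),
    (l.foldl (fun st e => match tgt e with | some j => st.modify j (f e) | none => st) st).length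
      = st.length := by
  intro l
  induction l with
  | nil => intro st; rfl
  | cons e l ih =>
    intro st
    simp only [List.foldl_cons]
    cases h : tgt e with
    | none => simp only [h]; exact ih st
    | some j => simp only [h]; rw [ih, List.length_modify]

theorem pv_getD_foldl_omodify {σ β : Type} (tgt : β → Option Nat) (f : β → σ → σ) :
    ∀ (l : List β) (st : List σ) (i : Nat) (d : σ), i < st.length →
    (l.foldl (fun st e => match tgt e with | some j => st.modify j (f e) | none => st) st).getD i d
      = (l.filter (fun e => tgt e == some i)).foldl (fun s e => f e s) (st.getD i d) := by
  intro l
  induction l with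
  | nil => intro st i d _; rfl
  | cons e l ih =>
    intro st i d hi
    simp only [List.foldl_cons]
    cases h : tgt e with
    | none =>
      rw [List.filter_cons_of_neg (by simp [h])]
      simp only [h]
      exact ih st i d hi
    | some j =>
      by_cases hji : j = i
      · subst hji
        rw [List.filter_cons_of_pos (by simp [h]), List.foldl_cons]
        simp only [h]
        rw [ih (st.modify j (f e)) j d (by simpa [List.length_modify] using hi)]
        congr 1
        rw [List.getD_eq_getElem _ _ (by simpa [List.length_modify] using hi),
            List.getD_eq_getElem _ _ hi, List.getElem_modify]
        simp
      · rw [List.filter_cons_of_neg (by simp [h, hji])]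
        simp only [h]
        rw [ih (st.modify j (f e)) i d (by simpa [List.length_modify] using hi)]
        congr 1
        rw [List.getD_eq_getElem _ _ (by simpa [List.length_modify] using hi),
            List.getD_eq_getElem _ _ hi, List.getElem_modify]
        simp [hji]


def pvAbsorb (albums : List (Int × List Int)) (sets : List (PySem.Set Int))
    (evs : List (Int × Int × Int × Bool)) : List (PySem.Set Int) :=
  evs.foldl (pvStepRec albums) sets

theorem pvStepRec_eq (albums : List (Int × List Int)) :
    pvStepRec albums = (fun st (e : Int × Int × Int × Bool) =>
      match (fun e : Int × Int × Int × Bool => pvLocate albums e.2.2.1) e with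
      | some j => st.modify j ((fun (e : Int × Int × Int × Bool) (s : PySem.Set Int) => PySem.Set.add s e.1) e)
      | none => st) := rfl

theorem pv_length_pvAbsorb (albums : List (Int × List Int)) (sets : List (PySem.Set Int))
    (evs : List (Int × Int × Int × Bool)) : (pvAbsorb albums sets evs).length = sets.length := by
  rw [pvAbsorb, pvStepRec_eq]
  exact pv_length_foldl_omodify _ _ evs sets

theorem pv_getD_pvAbsorb (albums : List (Int × List Int)) (sets : List (PySem.Set Int))
    (evs : List (Int × Int × Int × Bool)) (i : Nat) (hi : i < sets.length) :
    (pvAbsorb albums sets evs).getD i PySem.Set.empty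
      = PySem.Set.update (sets.getD i PySem.Set.empty)
          ((evs.filter (fun e => pvLocate albums e.2.2.1 == some i)).map (fun e => e.1)) := by
  rw [pvAbsorb, pvStepRec_eq, pv_getD_foldl_omodify _ _ evs sets i _ hi,
      PySem.Set.update_map_eq_foldl_add]


def pvTag (s : Int) : List (List (Int × Int × Int × Bool)) → List (Int × (Int × Int × Int × Bool))
  | [] => []
  | recs :: rest => recs.map (fun r => (s, r)) ++ pvTag (s + 1) rest

theorem pv_foldl_enumerate_flat {σ : Type} (g : σ → Int × (Int × Int × Int × Bool) → σ) :
    ∀ (rh : List (List (Int × Int × Int × Bool))) (s : Int) (st : σ),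
    (PySem.List.enumerate rh s).foldl
        (fun st pr => pr.2.foldl (fun st r => g st (pr.1, r)) st) st
      = (pvTag s rh).foldl g st := by
  intro rh
  induction rh with
  | nil => intro s st; rfl
  | cons recs rest ih =>
    intro s st
    rw [PySem.List.enumerate_cons, List.foldl_cons, pvTag, List.foldl_append, ih]
    congr 1
    rw [List.foldl_map]

theorem pvTag_append (l1 l2 : List (List (Int × Int × Int × Bool))) :
    ∀ s, pvTag s (l1 ++ l2) = pvTag s l1 ++ pvTag (s + l1.length) l2 := by
  induction l1 with
  | nil => intro s; simp [pvTag]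
  | cons recs rest ih =>
    intro s
    simp only [List.cons_append, pvTag, ih (s + 1), List.length_cons, List.append_assoc]
    congr 3
    push_cast
    ring

theorem pvTag_mem_tag {e : Int × (Int × Int × Int × Bool)} :
    ∀ (rh : List (List (Int × Int × Int × Bool))) (s : Int), e ∈ pvTag s rh →
    s ≤ e.1 ∧ e.1 < s + rh.length := by
  intro rh
  induction rh with
  | nil => intro s h; simp [pvTag] at h
  | cons recs rest ih =>
    intro s h
    rw [pvTag, List.mem_append] at h
    rcases h with h | h
    · obtain ⟨r, _, rfl⟩ := List.mem_map.1 h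
      simp only [List.length_cons]
      constructor <;> [exact le_refl s; push_cast] <;> omega
    · have := ih (s + 1) h
      simp only [List.length_cons]
      push_cast
      omega

-- tag-erasure: the users of the tagged, filtered stream are the users of the flat filtered stream
theorem pvTag_filter_map_fst (p : (Int × Int × Int × Bool) → Bool) :
    ∀ (rh : List (List (Int × Int × Int × Bool))) (s : Int),
    ((pvTag s rh).filter (fun e => p e.2)).map (fun e => e.2.1)
      = (rh.flatten.filter p).map (fun r => r.1) := by
  intro rh
  induction rh with
  | nil => intro s; rfl
  | cons recs rest ih =>
    intro s
    rw [pvTag, List.flatten_cons, List.filter_append, List.filter_append, List.map_append,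
        List.map_append, ih (s + 1), List.filter_map]
    congr 1
    rw [List.map_map]
    rfl


theorem pv_A_loop (albums : List (Int × List Int)) :
    ∀ (rest : List (List (Int × Int × Int × Bool))) (sets : List (PySem.Set Int))
      (rows : List (Int × List Int)), sets.length = rows.length →
    (rest.foldl (pvStepPeriod albums) (sets, rows)).2
      = (List.range rows.length).map (fun i => ((rows.getD i (0, [])).1,
          (rows.getD i (0, [])).2 ++ (List.range rest.length).map (fun k =>
            PySem.Set.len ((pvAbsorb albums sets ((rest.take (k+1)).flatten)).getD i PySem.Set.empty)))) := by
  intro rest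
  induction rest with
  | nil =>
    intro sets rows _
    simp only [List.foldl_nil, List.length_nil, List.range_zero, List.map_nil, List.append_nil]
    apply List.ext_getElem
    · simp
    · intro i h1 h2
      rw [List.getElem_map, List.getElem_range, List.getD_eq_getElem _ _ h1]
  | cons recs rest' ih =>
    intro sets rows hlen
    rw [List.foldl_cons]
    have hsets1 : (pvAbsorb albums sets recs).length = rows.length := by
      rw [pv_length_pvAbsorb, hlen]
    have hrows1 : (List.zipWith (fun (row : Int × List Int) (s : PySem.Set Int) =>
        (row.1, row.2 ++ [PySem.Set.len s])) rows (pvAbsorb albums sets recs)).length = rows.length := by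
      rw [List.length_zipWith, hsets1, min_self]
    have hstep : pvStepPeriod albums (sets, rows) recs
        = (pvAbsorb albums sets recs,
           List.zipWith (fun (row : Int × List Int) (s : PySem.Set Int) =>
             (row.1, row.2 ++ [PySem.Set.len s])) rows (pvAbsorb albums sets recs)) := rfl
    rw [hstep, ih _ _ (by rw [hsets1, hrows1]), hrows1]
    apply List.map_congr_left
    intro i hi
    rw [List.mem_range] at hi
    have hiz : i < (List.zipWith (fun (row : Int × List Int) (s : PySem.Set Int) =>
        (row.1, row.2 ++ [PySem.Set.len s])) rows (pvAbsorb albums sets recs)).length := by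
      rw [hrows1]; exact hi
    have hgd : (List.zipWith (fun (row : Int × List Int) (s : PySem.Set Int) =>
        (row.1, row.2 ++ [PySem.Set.len s])) rows (pvAbsorb albums sets recs)).getD i (0, [])
        = ((rows.getD i (0, [])).1, (rows.getD i (0, [])).2
            ++ [PySem.Set.len ((pvAbsorb albums sets recs).getD i PySem.Set.empty)]) := by
      rw [List.getD_eq_getElem _ _ hiz, List.getElem_zipWith,
          List.getD_eq_getElem _ _ (hlen ▸ hi), List.getD_eq_getElem _ _ (hsets1 ▸ hi)]
    rw [hgd]
    simp only [List.length_cons]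
    rw [List.range_succ_eq_map, List.map_cons, List.map_map]
    have h0 : ((recs :: rest').take (0+1)).flatten = recs := by simp
    have hsucc : ∀ k : Nat, (((recs :: rest').take (Nat.succ k + 1)).flatten)
        = recs ++ ((rest'.take (k+1)).flatten) := by
      intro k; simp [List.take_succ_cons]
    refine Prod.ext rfl ?_
    show ((rows.getD i (0, [])).2 ++ [PySem.Set.len ((pvAbsorb albums sets recs).getD i PySem.Set.empty)]) ++ _ = _
    rw [List.append_assoc, List.singleton_append]
    congr 1
    rw [h0]
    congr 1
    apply List.map_congr_left
    intro k _
    rw [Function.comp_apply]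
    show _ = ((pvAbsorb albums sets (List.take (k + 1 + 1) (recs :: rest')).flatten).getD i PySem.Set.empty).len
    rw [show (k + 1 + 1) = (k.succ + 1) from rfl, hsucc k, pvAbsorb, pvAbsorb, pvAbsorb, List.foldl_append]


theorem pv_get?_foldl_setdefault (v : Int) :
    ∀ (songs : List Int) (d : PySem.Dict Int Int) (s : Int),
    (songs.foldl (fun d x => d.setdefault x v) d).get? s
      = if d.get? s = none ∧ s ∈ songs then some v else d.get? s := by
  intro songs
  induction songs with
  | nil => intro d s; simp
  | cons x songs ih =>
    intro d s
    rw [List.foldl_cons]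
    cases hc : d.contains x with
    | true =>
      rw [PySem.Dict.setdefault_of_contains d v hc, ih]
      by_cases hx : s = x
      · subst hx
        have : d.get? s ≠ none := by
          intro hn
          rw [PySem.Dict.get?_eq_none_iff_contains] at hn
          rw [hc] at hn
          simp at hn
        simp [this]
      · simp [hx]
    | false =>
      rw [PySem.Dict.setdefault_of_not_contains d v hc, ih]
      by_cases hx : s = x
      · subst hx
        rw [PySem.Dict.get?_insert_self]
        have hnone : d.get? s = none := by
          rw [PySem.Dict.get?_eq_none_iff_contains]; exact hc
        simp [hnone]
      · rw [PySem.Dict.get?_insert_of_ne (hne := hx)]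
        simp [hx]

theorem pv_songIndex_get? (albums : List (Int × List Int)) (s : Int) :
    (pvSongIndex albums).get? s = (pvLocate albums s).map (fun n => (n : Int)) := by
  induction albums using List.reverseRecOn with
  | nil => rfl
  | append_singleton l a ih =>
    have hidx : pvSongIndex (l ++ [a])
        = a.2.foldl (fun d x => d.setdefault x (l.length : Int)) (pvSongIndex l) := by
      rw [pvSongIndex, pvSongIndex, PySem.List.enumerate_append, List.foldl_append]
      simp [PySem.List.enumerate_cons]
    rw [hidx, pv_get?_foldl_setdefault, ih]
    rw [pvLocate, pvLocate, List.findIdx?_append]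
    cases h : List.findIdx? (fun p => p.2.contains s) l with
    | some j => simp
    | none =>
      simp only [Option.map_none, Option.none_or]
      by_cases hm : s ∈ a.2
      · have : List.findIdx? (fun p => p.2.contains s) [a] = some 0 := by
          simp [List.findIdx?_cons, hm]
        simp [this, hm]
      · have : List.findIdx? (fun p => p.2.contains s) [a] = none := by
          simp [List.findIdx?_cons, hm]
        simp [this, hm]


theorem pv_firstSeen_eq_tag_fold (rh : List (List (Int × Int × Int × Bool)))
    (albums : List (Int × List Int)) :
    pvFirstSeen rh albums
      = (pvTag 0 rh).foldl
          (fun fs e =>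
            match (fun e : Int × (Int × Int × Int × Bool) =>
                ((pvSongIndex albums).get? e.2.2.2.1).map (·.toNat)) e with
            | some j => fs.modify j ((fun (e : Int × (Int × Int × Int × Bool))
                (d : PySem.Dict Int Int) => d.setdefault e.2.1 e.1) e)
            | none => fs)
          (albums.map (fun _ => PySem.Dict.empty)) := by
  rw [pvFirstSeen]
  rw [show (fun (fs : List (PySem.Dict Int Int)) (pr : Int × List (Int × Int × Int × Bool)) =>
        pr.2.foldl (fun fs r =>
          match (pvSongIndex albums).get? r.2.2.1 with
          | some idx => fs.modify idx.toNat (fun d => d.setdefault r.1 pr.1)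
          | none => fs) fs)
      = (fun (fs : List (PySem.Dict Int Int)) (pr : Int × List (Int × Int × Int × Bool)) =>
          pr.2.foldl (fun fs r => (fun (fs' : List (PySem.Dict Int Int)) (e : Int × (Int × Int × Int × Bool)) =>
            match (pvSongIndex albums).get? e.2.2.2.1 with
            | some idx => fs'.modify idx.toNat (fun d => d.setdefault e.2.1 e.1)
            | none => fs') fs (pr.1, r)) fs) from rfl]
  rw [pv_foldl_enumerate_flat (g := fun (fs' : List (PySem.Dict Int Int)) (e : Int × (Int × Int × Int × Bool)) =>
            match (pvSongIndex albums).get? e.2.2.2.1 with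
            | some idx => fs'.modify idx.toNat (fun d => d.setdefault e.2.1 e.1)
            | none => fs')]
  apply PySem.List.foldl_congr_mem
  intro fs e _
  cases h : (pvSongIndex albums).get? e.2.2.2.1 with
  | none => simp [h]
  | some idx => simp [h, Option.map_some]

theorem pv_length_firstSeen (rh : List (List (Int × Int × Int × Bool)))
    (albums : List (Int × List Int)) :
    (pvFirstSeen rh albums).length = albums.length := by
  rw [pv_firstSeen_eq_tag_fold, pv_length_foldl_omodify, List.length_map]

theorem pv_firstSeen_getD (rh : List (List (Int × Int × Int × Bool)))
    (albums : List (Int × List Int)) (i : Nat) (hi : i < albums.length) :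
    (pvFirstSeen rh albums).getD i PySem.Dict.empty
      = (((pvTag 0 rh).filter (fun e => pvLocate albums e.2.2.2.1 == some i)).map
          (fun e => (e.2.1, e.1))).foldl
          (fun d p => d.setdefault p.1 p.2) PySem.Dict.empty := by
  rw [pv_firstSeen_eq_tag_fold,
      pv_getD_foldl_omodify _ _ _ _ i _ (by rw [List.length_map]; exact hi)]
  have hpred : (fun (e : Int × (Int × Int × Int × Bool)) =>
      ((pvSongIndex albums).get? e.2.2.2.1).map (·.toNat) == some i)
      = (fun e => pvLocate albums e.2.2.2.1 == some i) := by
    funext e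
    rw [pv_songIndex_get?, Option.map_map]
    cases h : pvLocate albums e.2.2.2.1 with
    | none => simp
    | some j => simp [Function.comp, Int.toNat_natCast]
  rw [hpred, List.foldl_map]
  congr 1
  rw [List.getD_eq_getElem _ _ (by rw [List.length_map]; exact hi), List.getElem_map]


def pvFirsts (seen : List Int) : List (Int × Int) → List (Int × Int)
  | [] => []
  | (u, q) :: rest =>
    if u ∈ seen then pvFirsts seen rest else (u, q) :: pvFirsts (u :: seen) rest

theorem pvFirsts_congr : ∀ (us : List (Int × Int)) (s1 s2 : List Int),
    (∀ x, x ∈ s1 ↔ x ∈ s2) → pvFirsts s1 us = pvFirsts s2 us := by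
  intro us
  induction us with
  | nil => intro _ _ _; rfl
  | cons uq rest ih =>
    intro s1 s2 h
    obtain ⟨u, q⟩ := uq
    by_cases hu : u ∈ s1
    · rw [pvFirsts, pvFirsts, if_pos hu, if_pos ((h u).1 hu)]
      exact ih s1 s2 h
    · rw [pvFirsts, pvFirsts, if_neg hu, if_neg (fun hc => hu ((h u).2 hc))]
      exact congrArg _ (ih _ _ (by intro x; simp [h x]))

theorem pvFirsts_subset : ∀ (us : List (Int × Int)) (seen : List Int) (e : Int × Int),
    e ∈ pvFirsts seen us → e ∈ us := by
  intro us
  induction us with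
  | nil => intro seen e h; simpa [pvFirsts] using h
  | cons uq rest ih =>
    intro seen e h
    obtain ⟨u, q⟩ := uq
    by_cases hu : u ∈ seen
    · rw [pvFirsts, if_pos hu] at h
      exact List.mem_cons_of_mem _ (ih seen e h)
    · rw [pvFirsts, if_neg hu] at h
      rcases List.mem_cons.1 h with h | h
      · exact h ▸ List.mem_cons_self
      · exact List.mem_cons_of_mem _ (ih _ e h)

theorem pvFirsts_append : ∀ (xs ys : List (Int × Int)) (seen : List Int),
    pvFirsts seen (xs ++ ys)
      = pvFirsts seen xs ++ pvFirsts (seen ++ (pvFirsts seen xs).map (·.1)) ys := by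
  intro xs
  induction xs with
  | nil => intro ys seen; simp [pvFirsts]
  | cons uq rest ih =>
    intro ys seen
    obtain ⟨u, q⟩ := uq
    by_cases hu : u ∈ seen
    · rw [List.cons_append, pvFirsts, if_pos hu, pvFirsts, if_pos hu, ih]
    · rw [List.cons_append, pvFirsts, if_neg hu, pvFirsts, if_neg hu, ih, List.cons_append]
      refine congrArg ((u, q) :: ·) (congrArg (pvFirsts (u :: seen) rest ++ ·) ?_)
      apply pvFirsts_congr
      intro x
      simp only [List.map_cons, List.mem_append, List.mem_cons]
      tauto

theorem pvFirsts_fst_strong : ∀ (us : List (Int × Int)) (seen : List Int),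
    ((pvFirsts seen us).map (·.1)).Nodup ∧ ∀ e ∈ pvFirsts seen us, e.1 ∉ seen := by
  intro us
  induction us with
  | nil => intro seen; simp [pvFirsts]
  | cons uq rest ih =>
    intro seen
    obtain ⟨u, q⟩ := uq
    by_cases hu : u ∈ seen
    · rw [pvFirsts, if_pos hu]; exact ih seen
    · rw [pvFirsts, if_neg hu]
      obtain ⟨hnd, hns⟩ := ih (u :: seen)
      refine ⟨?_, ?_⟩
      · rw [List.map_cons, List.nodup_cons]
        refine ⟨?_, hnd⟩
        intro hc
        obtain ⟨e, he, heq⟩ := List.mem_map.1 hc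
        exact hns e he (heq ▸ List.mem_cons_self)
      · intro e he
        rcases List.mem_cons.1 he with h | h
        · exact h ▸ hu
        · intro hc
          exact hns e h (List.mem_cons_of_mem _ hc)

theorem pvFirsts_fst_mem : ∀ (us : List (Int × Int)) (seen : List Int) (x : Int),
    x ∈ (pvFirsts seen us).map (·.1) ↔ x ∈ us.map (·.1) ∧ x ∉ seen := by
  intro us
  induction us with
  | nil => intro seen x; simp [pvFirsts]
  | cons uq rest ih =>
    intro seen x
    obtain ⟨u, q⟩ := uq
    by_cases hu : u ∈ seen
    · rw [pvFirsts, if_pos hu, ih]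
      simp only [List.map_cons, List.mem_cons]
      constructor
      · rintro ⟨h, hn⟩; exact ⟨Or.inr h, hn⟩
      · rintro ⟨h | h, hn⟩
        · exact absurd (h ▸ hu) hn
        · exact ⟨h, hn⟩
    · rw [pvFirsts, if_neg hu]
      simp only [List.map_cons, List.mem_cons, ih, List.mem_cons]
      constructor
      · rintro (rfl | ⟨h, hn⟩)
        · exact ⟨Or.inl rfl, hu⟩
        · exact ⟨Or.inr h, fun hc => hn (Or.inr hc)⟩
      · rintro ⟨h | h, hn⟩
        · exact Or.inl h
        · by_cases hx : x = u
          · exact Or.inl hx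
          · exact Or.inr ⟨h, by simp [hx, hn]⟩

theorem pv_setdefault_fold_items : ∀ (us : List (Int × Int)) (d : PySem.Dict Int Int),
    d.keys.Nodup →
    (us.foldl (fun d p => d.setdefault p.1 p.2) d).items = d.items ++ pvFirsts d.keys us := by
  intro us
  induction us with
  | nil => intro d _; simp [pvFirsts]
  | cons uq rest ih =>
    intro d hnd
    obtain ⟨u, q⟩ := uq
    rw [List.foldl_cons]
    cases hc : d.contains u with
    | true =>
      rw [PySem.Dict.setdefault_of_contains d q hc, ih d hnd, pvFirsts,
          if_pos ((PySem.Dict.contains_iff_mem_keys d u).1 hc)]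
    | false =>
      rw [PySem.Dict.setdefault_of_not_contains d q hc, ih _ (PySem.Dict.nodup_keys_insert d u q hnd),
          PySem.Dict.items_insert_of_not_contains d q hc,
          PySem.Dict.keys_insert_of_not_contains d q hc, pvFirsts,
          if_neg (fun hm => by rw [(PySem.Dict.contains_iff_mem_keys d u).2 hm] at hc; cases hc)]
      rw [List.append_assoc, List.singleton_append]
      refine congrArg (d.items ++ ·) (congrArg ((u, q) :: ·) ?_)
      apply pvFirsts_congr
      intro x
      simp only [List.mem_append, List.mem_cons]
      tauto


theorem pv_getD_foldl_count : ∀ (l : List Int) (tbl : List Int) (j : Nat), j < tbl.length →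
    (∀ q ∈ l, 0 ≤ q) →
    (l.foldl (fun tbl q => tbl.modify q.toNat (· + 1)) tbl).getD j 0
      = tbl.getD j 0 + (l.count ((j : Nat) : Int) : Int) := by
  intro l
  induction l with
  | nil => intro tbl j _ _; simp
  | cons q l ih =>
    intro tbl j hj hpos
    rw [List.foldl_cons,
        ih (tbl.modify q.toNat (· + 1)) j (by rw [List.length_modify]; exact hj)
          (fun x hx => hpos x (List.mem_cons_of_mem _ hx)),
        List.count_cons]
    have h0q : 0 ≤ q := hpos q List.mem_cons_self
    by_cases hqj : q = (j : Int)
    · have : q.toNat = j := by omega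
      subst this
      have hmod : (tbl.modify q.toNat (· + 1)).getD q.toNat 0 = tbl.getD q.toNat 0 + 1 := by
        rw [List.getD_eq_getElem _ _ (by rw [List.length_modify]; exact hj),
            List.getD_eq_getElem _ _ hj, List.getElem_modify]
        simp
      rw [hmod]
      have : (q == (q.toNat : Int)) = true := by simp [Int.toNat_of_nonneg h0q]
      simp only [this, if_true]
      push_cast
      ring
    · have hne : q.toNat ≠ j := by omega
      have hmod : (tbl.modify q.toNat (· + 1)).getD j 0 = tbl.getD j 0 := by
        rw [List.getD_eq_getElem _ _ (by rw [List.length_modify]; exact hj),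
            List.getD_eq_getElem _ _ hj, List.getElem_modify]
        simp [hne]
      rw [hmod]
      have : (q == ((j : Nat) : Int)) = false := by simp [hqj]
      simp [this]

theorem pv_length_foldl_count (l : List Int) : ∀ (tbl : List Int),
    (l.foldl (fun tbl q => tbl.modify q.toNat (· + 1)) tbl).length = tbl.length := by
  induction l with
  | nil => intro tbl; rfl
  | cons q l ih => intro tbl; rw [List.foldl_cons, ih, List.length_modify]

theorem pv_newCounts_eq_map (P : Nat) (fs : PySem.Dict Int Int)
    (hpos : ∀ q ∈ fs.values, 0 ≤ q) :
    pvNewCounts P fs = (List.range P).map (fun j => (fs.values.count ((j : Nat) : Int) : Int)) := by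
  apply List.ext_getElem
  · rw [pvNewCounts, pv_length_foldl_count, List.length_replicate, List.length_map,
        List.length_range]
  · intro j h1 h2
    have hjP : j < P := by
      rw [pvNewCounts, pv_length_foldl_count, List.length_replicate] at h1; exact h1
    rw [List.getElem_map, List.getElem_range,
        ← List.getD_eq_getElem _ 0 h1, pvNewCounts,
        pv_getD_foldl_count _ _ j (by rw [List.length_replicate]; exact hjP) hpos,
        List.getD_replicate _ hjP]
    simp

theorem pv_prefixSums_loop : ∀ (row : List Int) (a : Int) (acc : List Int),
    (row.foldl (fun (st : Int × List Int) c => (st.1 + c, st.2 ++ [st.1 + c])) (a, acc)).2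
      = acc ++ (List.range row.length).map (fun p => a + (row.take (p+1)).sum) := by
  intro row
  induction row with
  | nil => intro a acc; simp
  | cons c row ih =>
    intro a acc
    rw [List.foldl_cons, ih, List.length_cons, List.range_succ_eq_map, List.map_cons,
        List.map_map, List.append_assoc, List.singleton_append]
    refine congrArg (acc ++ ·) ?_
    refine congrArg₂ (· :: ·) (by simp) ?_
    apply List.map_congr_left
    intro k _
    rw [Function.comp_apply]
    show (a + c) + (row.take (k+1)).sum = a + ((c :: row).take (k.succ+1)).sum
    rw [List.take_succ_cons, List.sum_cons]
    ring

theorem pv_countP_lt_succ (n : Nat) : ∀ (l : List Int),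
    l.countP (fun q => decide (q < (n : Int) + 1))
      = l.countP (fun q => decide (q < (n : Int))) + l.count ((n : Nat) : Int) := by
  intro l
  induction l with
  | nil => rfl
  | cons q l ih =>
    rw [List.countP_cons, List.countP_cons, List.count_cons, ih]
    by_cases h1 : q < (n : Int)
    · have h2 : q < (n : Int) + 1 := by omega
      have h3 : (q == ((n : Nat) : Int)) = false := by simp; omega
      simp [h1, h2, h3]
      omega
    · by_cases h2 : q = (n : Int)
      · have h3 : (q == ((n : Nat) : Int)) = true := by simp [h2]
        have h4 : q < (n : Int) + 1 := by omega
        simp [h1, h2, h3, h4]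
        omega
      · have h3 : (q == ((n : Nat) : Int)) = false := by simp [h2]
        have h4 : ¬ q < (n : Int) + 1 := by omega
        simp [h1, h3, h4]

theorem pv_sum_range_count (l : List Int) (hpos : ∀ q ∈ l, 0 ≤ q) : ∀ (n : Nat),
    ((List.range n).map (fun j => (l.count ((j : Nat) : Int) : Int))).sum
      = (l.countP (fun q => decide (q < (n : Int))) : Int) := by
  intro n
  induction n with
  | zero =>
    simp only [List.range_zero, List.map_nil, List.sum_nil]
    have : l.countP (fun q => decide (q < ((0 : Nat) : Int))) = 0 := by
      rw [List.countP_eq_zero]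
      intro q hq
      simp
      exact hpos q hq
    rw [this]
    rfl
  | succ m ih =>
    rw [List.range_succ, List.map_append, List.sum_append, ih]
    have hcast : ((m + 1 : Nat) : Int) = (m : Int) + 1 := by push_cast; ring
    simp only [hcast, pv_countP_lt_succ m l]
    push_cast
    simp


theorem pv_A_char (rh : List (List (Int × Int × Int × Bool))) (albums : List (Int × List Int))
    (I : Int) :
    extract_listeners_over_time rh albums I
      = (List.range albums.length).map (fun i => ((albums.getD i (0, [])).1,
          (List.range rh.length).map (fun k =>
            PySem.Set.len (PySem.Set.ofList (((rh.take (k+1)).flatten.filter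
              (fun r => pvLocate albums r.2.2.1 == some i)).map (fun r => r.1)))))) := by
  unfold extract_listeners_over_time
  rw [pv_A_loop albums rh _ _ (by simp), List.length_map]
  apply List.map_congr_left
  intro i hi
  rw [List.mem_range] at hi
  have hrow : ((albums.map (fun a => (a.1, ([] : List Int)))).getD i (0, []))
      = ((albums.getD i (0, [])).1, ([] : List Int)) := by
    rw [List.getD_eq_getElem _ _ (by simp [hi]), List.getElem_map, List.getD_eq_getElem _ _ hi]
  rw [hrow]
  refine congrArg _ ?_
  show ([] : List Int) ++ _ = _
  rw [List.nil_append]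
  apply List.map_congr_left
  intro k _
  rw [pv_getD_pvAbsorb _ _ _ i (by simp [hi])]
  have hinit : ((albums.map (fun _ => (PySem.Set.empty : PySem.Set Int))).getD i PySem.Set.empty)
      = PySem.Set.empty := by
    rw [List.getD_eq_getElem _ _ (by simp [hi]), List.getElem_map]
  rw [hinit, show (PySem.Set.empty : PySem.Set Int) = [] from rfl, PySem.Set.update_nil_left]


theorem pv_crux (rh : List (List (Int × Int × Int × Bool))) (albums : List (Int × List Int))
    (i : Nat) (p : Nat) (hp : p < rh.length) :
    ((pvFirsts [] (((pvTag 0 rh).filter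
        (fun e => pvLocate albums e.2.2.2.1 == some i)).map (fun e => (e.2.1, e.1)))).map
          (fun x => x.2)).countP (fun q => decide (q < (p : Int) + 1))
      = (PySem.Set.ofList (((rh.take (p+1)).flatten.filter
          (fun r => pvLocate albums r.2.2.1 == some i)).map (fun r => r.1))).length := by
  have hlen_take : (rh.take (p+1)).length = p + 1 := by
    rw [List.length_take]; omega
  have hsplit : pvTag 0 rh
      = pvTag 0 (rh.take (p+1)) ++ pvTag ((p : Int) + 1) (rh.drop (p+1)) := by
    conv_lhs => rw [← List.take_append_drop (p+1) rh]
    rw [pvTag_append, hlen_take]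
    norm_num
  rw [hsplit, List.filter_append, List.map_append, pvFirsts_append, List.map_append,
      List.countP_append]
  -- the late part counts zero: all its tags are ≥ p+1
  have h2 : ((pvFirsts ([] ++ (pvFirsts []
      (((pvTag 0 (rh.take (p+1))).filter (fun e => pvLocate albums e.2.2.2.1 == some i)).map
        (fun e => (e.2.1, e.1)))).map (·.1))
      (((pvTag ((p : Int) + 1) (rh.drop (p+1))).filter
        (fun e => pvLocate albums e.2.2.2.1 == some i)).map (fun e => (e.2.1, e.1)))).map
          (fun x => x.2)).countP (fun q => decide (q < (p : Int) + 1)) = 0 := by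
    rw [List.countP_eq_zero]
    intro q hq
    obtain ⟨e, he, rfl⟩ := List.mem_map.1 hq
    have he2 := pvFirsts_subset _ _ _ he
    obtain ⟨e', he', rfl⟩ := List.mem_map.1 he2
    have he3 := List.mem_filter.1 he'
    have := pvTag_mem_tag _ _ he3.1
    simp only [decide_eq_true_eq]
    omega
  rw [h2, Nat.add_zero]
  -- the early part counts fully: all its tags are < p+1
  have h1 : ∀ x ∈ (pvFirsts [] (((pvTag 0 (rh.take (p+1))).filter
      (fun e => pvLocate albums e.2.2.2.1 == some i)).map (fun e => (e.2.1, e.1)))).map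
        (fun x => x.2), decide (x < (p : Int) + 1) = true := by
    intro q hq
    obtain ⟨e, he, rfl⟩ := List.mem_map.1 hq
    have he2 := pvFirsts_subset _ _ _ he
    obtain ⟨e', he', rfl⟩ := List.mem_map.1 he2
    have he3 := List.mem_filter.1 he'
    have := pvTag_mem_tag _ _ he3.1
    simp only [decide_eq_true_eq]
    rw [hlen_take] at this
    omega
  rw [List.countP_eq_length.2 h1, List.length_map]
  -- first keys are the distinct users of the early stream
  have husers : ((pvTag 0 (rh.take (p+1))).filter
      (fun e => pvLocate albums e.2.2.2.1 == some i)).map (fun e => e.2.1)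
      = ((rh.take (p+1)).flatten.filter
          (fun r => pvLocate albums r.2.2.1 == some i)).map (fun r => r.1) := by
    have h := pvTag_filter_map_fst (fun r => pvLocate albums r.2.2.1 == some i)
      (rh.take (p+1)) 0
    beta_reduce at h
    exact h
  have hfst : ((pvFirsts [] (((pvTag 0 (rh.take (p+1))).filter
      (fun e => pvLocate albums e.2.2.2.1 == some i)).map (fun e => (e.2.1, e.1)))).map
        (fun x => x.1)).length
      = (PySem.Set.ofList (((rh.take (p+1)).flatten.filter
          (fun r => pvLocate albums r.2.2.1 == some i)).map (fun r => r.1))).length := by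
    apply List.Perm.length_eq
    rw [List.perm_ext_iff_of_nodup (pvFirsts_fst_strong _ _).1 (PySem.Set.nodup_ofList _)]
    intro x
    rw [pvFirsts_fst_mem, PySem.Set.mem_ofList, List.map_map, ← husers]
    simp [Function.comp]
  rw [← hfst, List.length_map]


theorem pv_main (rh : List (List (Int × Int × Int × Bool))) (albums : List (Int × List Int))
    (I : Int) :
    extract_listeners_over_time rh albums I = extract_listeners_over_time_alt rh albums I := by
  rw [pv_A_char rh albums I]
  unfold extract_listeners_over_time_alt
  rw [PySem.List.foldl_append_singleton_eq_map
        (f := fun (p : (Int × List Int) × PySem.Dict Int Int) =>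
          (p.1.1, pvPrefixSums (pvNewCounts rh.length p.2))),
      List.nil_append]
  apply List.ext_getElem
  · rw [List.length_map, List.length_range, List.length_map, List.length_zip,
        pv_length_firstSeen, min_self]
  · intro i h1 h2
    rw [List.length_map, List.length_range] at h1
    rw [List.getElem_map, List.getElem_range, List.getElem_map, List.getElem_zip]
    have hfs : (pvFirstSeen rh albums)[i]'(by rw [pv_length_firstSeen]; exact h1)
        = (((pvTag 0 rh).filter (fun e => pvLocate albums e.2.2.2.1 == some i)).map
            (fun e => (e.2.1, e.1))).foldl
            (fun d p => d.setdefault p.1 p.2) PySem.Dict.empty := by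
      rw [← List.getD_eq_getElem _ PySem.Dict.empty (by rw [pv_length_firstSeen]; exact h1)]
      exact pv_firstSeen_getD rh albums i h1
    have hvalues : ((pvFirstSeen rh albums)[i]'(by rw [pv_length_firstSeen]; exact h1)).values
        = (pvFirsts [] (((pvTag 0 rh).filter
            (fun e => pvLocate albums e.2.2.2.1 == some i)).map (fun e => (e.2.1, e.1)))).map
            (fun x => x.2) := by
      rw [hfs]
      show (_ : PySem.Dict Int Int).items.map (fun x => x.2) = _
      rw [pv_setdefault_fold_items _ PySem.Dict.empty (by simp [PySem.Dict.empty])]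
      rfl
    have hpos : ∀ q ∈ ((pvFirstSeen rh albums)[i]'(by rw [pv_length_firstSeen]; exact h1)).values,
        0 ≤ q := by
      rw [hvalues]
      intro q hq
      obtain ⟨e, he, rfl⟩ := List.mem_map.1 hq
      have he2 := pvFirsts_subset _ _ _ he
      obtain ⟨e', he', rfl⟩ := List.mem_map.1 he2
      have he3 := List.mem_filter.1 he'
      have := pvTag_mem_tag _ _ he3.1
      omega
    refine Prod.ext ?_ ?_
    · show (albums.getD i (0, [])).1 = albums[i].1
      rw [List.getD_eq_getElem _ _ h1]
    show (List.range rh.length).map _ = pvPrefixSums (pvNewCounts rh.length _)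
    rw [pv_newCounts_eq_map _ _ hpos, pvPrefixSums,
        pv_prefixSums_loop _ 0 [], List.nil_append, List.length_map, List.length_range]
    apply List.map_congr_left
    intro k hk
    rw [List.mem_range] at hk
    rw [← List.map_take, List.take_range, Nat.min_eq_left (by omega),
        pv_sum_range_count _ (by
          intro q hq
          rw [hvalues] at hq
          obtain ⟨e, he, rfl⟩ := List.mem_map.1 hq
          have he2 := pvFirsts_subset _ _ _ he
          obtain ⟨e', he', rfl⟩ := List.mem_map.1 he2
          have he3 := List.mem_filter.1 he'
          have := pvTag_mem_tag _ _ he3.1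
          omega) (k+1)]
    rw [hvalues]
    have hcast : ((k + 1 : Nat) : Int) = (k : Int) + 1 := by push_cast; ring
    simp only [hcast]
    rw [pv_crux rh albums i k hk, zero_add]
    rfl

-- ===== VERDICT (by name: the statement is the Claim_ definition above) =====
theorem extract_listeners_over_time_spec : Claim_equal_extract_listeners_over_time := by
  intro recommendations_history albums I _
  exact pv_main recommendations_history albums I
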